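-- pv_equiv track=rewrite | github.com/aeioiie/baekjoon | 백준/Silver/12789. 도키도키 간식드리미/도키도키 간식드리미.py | temporary
-- ===== SOURCE A (Python) =====
-- def temporary(num):
--     temp = []
--     target = 1
--
--     for i in num:
--         while temp and temp[-1] == target:
--             temp.pop()
--             target += 1
--         if i == target:
--             target += 1
--         else:
--             temp.append(i)
--
--     while temp and temp[-1] == target:
--         temp.pop()
--         target += 1
--
--     if not temp:
--         return "Nice"
--     else:
--         return "Sad"
-- ===== SOURCE B (Python) =====
-- def temporary(num):
--     # Divide and conquer on the position of the maximum: the segment [seg] must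
--     # hold exactly the values base..base+len(seg)-1; its maximum is popped last,
--     # so everything before it must be the low block and everything after it the
--     # high block, each independently feasible.  No stack simulation.
--     jobs = [(num, 1)]
--     while jobs:
--         seg, base = jobs.pop()
--         if seg:
--             m = max(seg)
--             if m != base + len(seg) - 1:
--                 return "Sad"
--             p = seg.index(m)
--             jobs.append((seg[p + 1:], base + p))
--             jobs.append((seg[:p], base))
--     return "Nice"
-- ===== Notes on version B (the rewrite author's own statement) =====
-- stated objective: alternative
-- what changed: Replaces A's online stack simulation with an offline divide-and-conquer: each segment must have its maximum exactly at value base+len-1, and splitting at that maximum yields two independent subproblems processed via an explicit worklist; no stack of pending people and no incrementing target counter.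
import Mathlib
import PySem

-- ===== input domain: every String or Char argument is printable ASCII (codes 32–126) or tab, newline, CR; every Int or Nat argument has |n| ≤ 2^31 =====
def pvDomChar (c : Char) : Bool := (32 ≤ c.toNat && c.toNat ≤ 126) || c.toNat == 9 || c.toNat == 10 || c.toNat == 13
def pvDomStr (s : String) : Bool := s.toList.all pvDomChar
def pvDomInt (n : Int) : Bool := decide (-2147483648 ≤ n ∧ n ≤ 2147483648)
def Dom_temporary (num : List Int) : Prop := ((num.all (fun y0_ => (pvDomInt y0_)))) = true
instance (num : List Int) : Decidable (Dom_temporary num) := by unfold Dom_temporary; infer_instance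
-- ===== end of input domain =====

-- B replaces A's online stack simulation by a divide-and-conquer on the position of the
-- maximum (worklist of segments); alternative algorithm, same return value.


-- ===== PORT A =====
-- the `while temp and temp[-1] == target: temp.pop(); target += 1` loop of A;
-- the stack is held top-first (head = Python's temp[-1])
def pvDrain : List Int → Int → List Int × Int
  | [], g => ([], g)
  | h :: t, g => if h = g then pvDrain t (g + 1) else (h :: t, g)

-- A's loop body: drain, then `if i == target: target += 1 else: temp.append(i)`
def pvStepA (s : List Int × Int) (i : Int) : List Int × Int :=
  let s' := pvDrain s.1 s.2
  if i = s'.2 then (s'.1, s'.2 + 1) else (i :: s'.1, s'.2)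

def temporary (num : List Int) : String :=
  let s := num.foldl pvStepA ([], 1)
  let s' := pvDrain s.1 s.2
  if s'.1 = [] then "Nice" else "Sad"

-- ===== PORT B =====
-- B's worklist loop: jobs is Python's `jobs` with head = top (last appended);
-- each job (seg, base) is checked: max(seg) must be base+len(seg)-1, then split at its index.
def pvJobSize (j : List Int × Int) : Nat := 2 * j.1.length + 1

def pvRun : List (List Int × Int) → Bool
  | [] => true
  | (seg, base) :: rest =>
    if hseg : seg = [] then pvRun rest
    else
      match hm : PySem.List.max? seg (fun y => y) with
      | none => false      -- unreachable: seg ≠ [] (Python max never raises here)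
      | some m =>
        if m ≠ base + (seg.length : Int) - 1 then false
        else
          match hp : PySem.List.index? seg m with
          | none => false  -- unreachable: the max is a member
          | some p =>
            pvRun ((PySem.List.slice seg none (some (p : Int)), base) ::
                   (PySem.List.slice seg (some ((p : Int) + 1)) none, base + (p : Int)) :: rest)
termination_by jobs => (jobs.map pvJobSize).sum
decreasing_by
  · simp only [pvJobSize, List.map_cons, List.sum_cons]
    omega
  · obtain ⟨hk, -, -⟩ := PySem.List.getElem_of_index?_eq_some hp
    have h1 : PySem.List.slice seg none (some (p : Int)) = seg.take p :=
      PySem.List.slice_to_natCast seg p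
    have h2 : PySem.List.slice seg (some ((p : Int) + 1)) none = seg.drop (p + 1) := by
      have : ((p : Int) + 1) = ((p + 1 : Nat) : Int) := by push_cast; ring
      rw [this, PySem.List.slice_from_natCast]
    simp [pvJobSize, h1, h2]
    omega

def temporary_alt (num : List Int) : String :=
  if pvRun [(num, 1)] then "Nice" else "Sad"

-- ===== PRECONDITION & SPEC =====
def Spec_temporary (num : List Int) (out : String) : Prop := out = temporary_alt num
instance (num : List Int) (out : String) : Decidable (Spec_temporary num out) := by unfold Spec_temporary; infer_instance

-- ===== CLAIM (what is proved, stated in full; the proofs are below) =====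
def Claim_equal_temporary : Prop := ∀ (num : List Int), Dom_temporary num → Spec_temporary num (temporary num)

-- ===== LEMMAS AND PROOFS =====

-- proof-side bridge state machine: push, then drain (the canonical stack step)
def pvStepB (s : List Int × Int) (i : Int) : List Int × Int :=
  pvDrain (i :: s.1) s.2

-- the Int range [a, b) as a list
def pvR (a b : Int) : List Int := PySem.List.pyRange a b 1

theorem pvStep_comm (s : List Int × Int) (i : Int) :
    pvStepB (pvDrain s.1 s.2) i = pvDrain (pvStepA s i).1 (pvStepA s i).2 := by
  unfold pvStepA pvStepB
  by_cases h : i = (pvDrain s.1 s.2).2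
  · subst h
    rw [pvDrain]
    simp
  · simp only [if_neg h]

theorem pvFoldl_comm (num : List Int) (s : List Int × Int) :
    num.foldl pvStepB (pvDrain s.1 s.2) =
      pvDrain (num.foldl pvStepA s).1 (num.foldl pvStepA s).2 := by
  induction num generalizing s with
  | nil => simp
  | cons i num ih =>
    simp only [List.foldl_cons]
    rw [pvStep_comm s i, ih (pvStepA s i)]

theorem pvDrain_spec (s : List Int) (t : Int) :
    ∃ s' t', pvDrain s t = (s', t') ∧ s = pvR t t' ++ s' ∧ t ≤ t' ∧
      pvDrain s' t' = (s', t') := by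
  induction s generalizing t with
  | nil =>
    exact ⟨[], t, rfl, by simp [pvR, PySem.List.pyRange_one_eq_nil le_rfl], le_rfl, rfl⟩
  | cons h tl ih =>
    by_cases hh : h = t
    · subst hh
      obtain ⟨s', t', he, hdec, hle, hdr⟩ := ih (h + 1)
      refine ⟨s', t', by simp [pvDrain, he], ?_, by omega, hdr⟩
      rw [pvR, PySem.List.pyRange_one_cons (by omega)]
      simpa [pvR] using hdec
    · exact ⟨h :: tl, t, by simp [pvDrain, hh], by simp [pvR, PySem.List.pyRange_one_eq_nil le_rfl], le_rfl, by simp [pvDrain, hh]⟩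

theorem pvDrain_conserve (s : List Int) (t : Int) :
    (pvDrain s t).2 + ((pvDrain s t).1.length : Int) = t + s.length := by
  obtain ⟨s', t', he, hdec, hle, -⟩ := pvDrain_spec s t
  rw [he]
  have := congrArg List.length hdec
  simp [pvR, PySem.List.length_pyRange_one] at this
  simp
  omega

theorem pvFoldl_conserve (seq : List Int) (s : List Int) (t : Int) :
    (seq.foldl pvStepB (s, t)).2 + (((seq.foldl pvStepB (s, t)).1.length : Int)) =
      t + s.length + seq.length := by
  induction seq generalizing s t with
  | nil => simp
  | cons i seq ih =>
    simp only [List.foldl_cons]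
    have hstep : pvStepB (s, t) i = pvDrain (i :: s) t := rfl
    obtain ⟨s2, t2, he, -, -, -⟩ := pvDrain_spec (i :: s) t
    have hc := pvDrain_conserve (i :: s) t
    rw [he] at hc
    rw [hstep, he]
    have := ih s2 t2
    simp at hc ⊢
    omega

theorem pvFoldl_mono (seq : List Int) (s : List Int) (t : Int) :
    t ≤ (seq.foldl pvStepB (s, t)).2 := by
  induction seq generalizing s t with
  | nil => simp
  | cons i seq ih =>
    simp only [List.foldl_cons]
    have hstep : pvStepB (s, t) i = pvDrain (i :: s) t := rfl
    obtain ⟨s2, t2, he, -, hle, -⟩ := pvDrain_spec (i :: s) t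
    rw [hstep, he]
    exact le_trans hle (ih s2 t2)

theorem pvR_append (a b c : Int) (h1 : a ≤ b) (h2 : b ≤ c) :
    pvR a c = pvR a b ++ pvR b c := PySem.List.pyRange_one_append a b c h1 h2

theorem pvFoldl_multiset (seq : List Int) (s : List Int) (t : Int) :
    ((seq.foldl pvStepB (s, t)).1 : Multiset Int) +
      (pvR t (seq.foldl pvStepB (s, t)).2 : Multiset Int) = (s : Multiset Int) + (seq : Multiset Int) := by
  induction seq generalizing s t with
  | nil => simp [pvR, PySem.List.pyRange_one_eq_nil le_rfl]
  | cons i seq ih =>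
    simp only [List.foldl_cons]
    have hstep : pvStepB (s, t) i = pvDrain (i :: s) t := rfl
    obtain ⟨s2, t2, he, hdec, hle, -⟩ := pvDrain_spec (i :: s) t
    rw [hstep, he]
    have hmono := pvFoldl_mono seq s2 t2
    have hsplit := pvR_append t t2 (seq.foldl pvStepB (s2, t2)).2 hle hmono
    rw [hsplit]
    have := ih s2 t2
    have hms : ((i :: s : List Int) : Multiset Int) = (pvR t t2 : Multiset Int) + (s2 : Multiset Int) := by
      rw [hdec]; simp
    have hgoal : ((seq.foldl pvStepB (s2, t2)).1 : Multiset Int) +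
        ((pvR t t2 : Multiset Int) + (pvR t2 (seq.foldl pvStepB (s2, t2)).2 : Multiset Int)) =
        (s : Multiset Int) + (i ::ₘ (seq : Multiset Int)) := by
      have h1 : ((seq.foldl pvStepB (s2, t2)).1 : Multiset Int) + (pvR t2 (seq.foldl pvStepB (s2, t2)).2 : Multiset Int) = (s2 : Multiset Int) + (seq : Multiset Int) := this
      have h2 : ((i :: seq : List Int) : Multiset Int) = (i ::ₘ (seq : Multiset Int)) := by simp
      have h3 : ((i :: s : List Int) : Multiset Int) = (i ::ₘ (s : Multiset Int)) := by simp
      rw [h3] at hms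
      have hms' : ({i} : Multiset Int) + (s : Multiset Int) = (pvR t t2 : Multiset Int) + (s2 : Multiset Int) := by
        rw [Multiset.singleton_add]; exact hms
      rw [← Multiset.singleton_add]
      rw [add_left_comm, h1, ← add_assoc, ← hms', add_left_comm]
      rw [add_assoc, add_left_comm]
    simpa using hgoal

theorem pvR_pairwise (a b : Int) : (pvR a b).Pairwise (· < ·) :=
  PySem.List.pairwise_lt_pyRange_one a b

theorem pvR_mem {x a b : Int} : x ∈ pvR a b ↔ a ≤ x ∧ x < b := PySem.List.mem_pyRange_one

theorem pvFoldl_sorted (seq : List Int) (s : List Int) (t : Int)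
    (h : (seq.foldl pvStepB (s, t)).1 = []) :
    s.Pairwise (· < ·) ∧ ∀ x ∈ s, t ≤ x := by
  induction seq generalizing s t with
  | nil => simp at h; subst h; simp
  | cons i seq ih =>
    simp only [List.foldl_cons] at h
    have hstep : pvStepB (s, t) i = pvDrain (i :: s) t := rfl
    obtain ⟨s2, t2, he, hdec, hle, -⟩ := pvDrain_spec (i :: s) t
    rw [hstep, he] at h
    obtain ⟨hp2, hb2⟩ := ih s2 t2 h
    by_cases ht : t2 = t
    · have hnil : pvR t t2 = [] := by
        rw [pvR]; exact PySem.List.pyRange_one_eq_nil (le_of_eq ht)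
      rw [hnil, List.nil_append] at hdec
      constructor
      · have := hdec ▸ hp2
        exact (List.pairwise_cons.mp this).2
      · intro x hx
        have := hb2 x (by rw [← hdec]; exact List.mem_cons_of_mem i hx)
        omega
    · have htlt : t < t2 := lt_of_le_of_ne hle (fun e => ht e.symm)
      rw [pvR, PySem.List.pyRange_one_cons htlt] at hdec
      -- hdec : i :: s = t :: pyRange (t+1) t2 1 ++ s2
      have hs : s = pvR (t + 1) t2 ++ s2 := by
        have := congrArg List.tail hdec
        simpa [pvR] using this
      subst hs
      constructor
      · rw [List.pairwise_append]
        refine ⟨pvR_pairwise _ _, hp2, ?_⟩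
        intro x hx y hy
        have hxb := (pvR_mem.mp hx).2
        exact lt_of_lt_of_le hxb (hb2 y hy)
      · intro x hx
        rcases List.mem_append.mp hx with hx | hx
        · have := (pvR_mem.mp hx).1; omega
        · exact le_trans (le_of_lt htlt) (hb2 x hx)

theorem pvDrain_append (a b : List Int) (t : Int) :
    pvDrain (a ++ b) t =
      (if (pvDrain a t).1 = [] then pvDrain b (pvDrain a t).2
       else ((pvDrain a t).1 ++ b, (pvDrain a t).2)) := by
  induction a generalizing t with
  | nil => simp [pvDrain]
  | cons h tl ih =>
    by_cases hh : h = t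
    · subst hh
      simp only [List.cons_append, pvDrain, if_pos rfl]
      exact ih (h + 1)
    · simp [pvDrain, hh]

theorem pvBottom (seq : List Int) (s : List Int) (t m : Int)
    (H1 : t + (s.length : Int) + (seq.length : Int) ≤ m)
    (H2 : s = [] → seq = [] → t < m)
    (Hd : pvDrain s t = (s, t)) :
    seq.foldl pvStepB (s ++ [m], t) =
      (if (seq.foldl pvStepB (s, t)).1 = []
        then pvDrain [m] (seq.foldl pvStepB (s, t)).2
        else ((seq.foldl pvStepB (s, t)).1 ++ [m], (seq.foldl pvStepB (s, t)).2)) := by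
  induction seq generalizing s t with
  | nil =>
    simp only [List.foldl_nil]
    by_cases hs : s = []
    · subst hs
      have hm : ¬ (m = t) := by simp at H1 H2 ⊢; omega
      simp only [List.nil_append, if_pos rfl]
      simp [pvDrain, hm]
    · simp [hs]
  | cons i rest ih =>
    simp only [List.foldl_cons]
    obtain ⟨s2, t2, he, hdec, hle, hdr⟩ := pvDrain_spec (i :: s) t
    have hcons : t2 + (s2.length : Int) = t + 1 + s.length := by
      have := pvDrain_conserve (i :: s) t
      rw [he] at this; simp at this; omega
    have hstep1 : pvStepB (s ++ [m], t) i = pvDrain ((i :: s) ++ [m]) t := rfl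
    have hstep2 : pvStepB (s, t) i = (s2, t2) := by rw [show pvStepB (s, t) i = pvDrain (i :: s) t from rfl, he]
    rw [hstep1, hstep2, pvDrain_append (i :: s) [m] t, he]
    by_cases hs2 : s2 = []
    · subst hs2
      simp only [if_pos rfl]
      have ht2 : t2 = t + 1 + s.length := by simpa using hcons
      by_cases hrest : rest = []
      · subst hrest
        simp
      · have ht2m : t2 < m := by
          have : (1 : Int) ≤ rest.length := by
            cases rest with
            | nil => exact absurd rfl hrest
            | cons a l => simp
          simp at H1; omega
        have : pvDrain [m] t2 = ([m], t2) := by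
          simp [pvDrain]; omega
        rw [this]
        have := ih [] t2 (by simp; simp at H1; omega) (fun _ hr => absurd hr hrest) rfl
        simpa using this
    · simp only [if_neg hs2]
      exact ih s2 t2 (by simp at H1 ⊢; omega) (fun h2 => absurd h2 hs2) hdr

def pvValidB : List Int → Int → Bool
  | seg, base =>
    if hseg : seg = [] then true
    else
      match hm : PySem.List.max? seg (fun y => y) with
      | none => false
      | some m =>
        if m ≠ base + (seg.length : Int) - 1 then false
        else
          match hp : PySem.List.index? seg m with
          | none => false
          | some p =>
            pvValidB (PySem.List.slice seg none (some (p : Int))) base &&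
            pvValidB (PySem.List.slice seg (some ((p : Int) + 1)) none) (base + (p : Int))
termination_by seg _ => seg.length
decreasing_by
  all_goals
    obtain ⟨hk, -, -⟩ := PySem.List.getElem_of_index?_eq_some hp
  · rw [PySem.List.slice_to_natCast]; simp; omega
  · have : ((p : Int) + 1) = ((p + 1 : Nat) : Int) := by push_cast; ring
    rw [this, PySem.List.slice_from_natCast]; simp; omega


theorem pvValidB_nil (base : Int) : pvValidB [] base = true := by
  rw [pvValidB]; simp

theorem pvValidB_eq (seg : List Int) (base m : Int) (p : Nat)
    (hseg : ¬ seg = []) (hm : PySem.List.max? seg (fun y => y) = some m)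
    (hne : m = base + (seg.length : Int) - 1)
    (hp : PySem.List.index? seg m = some p) :
    pvValidB seg base =
      (pvValidB (seg.take p) base && pvValidB (seg.drop (p + 1)) (base + (p : Int))) := by
  have h1 : PySem.List.slice seg none (some (p : Int)) = seg.take p :=
    PySem.List.slice_to_natCast seg p
  have h2 : PySem.List.slice seg (some ((p : Int) + 1)) none = seg.drop (p + 1) := by
    have : ((p : Int) + 1) = ((p + 1 : Nat) : Int) := by push_cast; ring
    rw [this, PySem.List.slice_from_natCast]
  rw [pvValidB, dif_neg hseg]
  split <;> try simp_all
  all_goals subst hm; split <;> simp_all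

theorem pvValidB_ne (seg : List Int) (base m : Int)
    (hseg : ¬ seg = []) (hm : PySem.List.max? seg (fun y => y) = some m)
    (hne : ¬ m = base + (seg.length : Int) - 1) :
    pvValidB seg base = false := by
  rw [pvValidB, dif_neg hseg]
  split <;> simp_all

theorem pvRun_nil : pvRun [] = true := by rw [pvRun]

theorem pvRun_cons_nil (base : Int) (rest : List (List Int × Int)) :
    pvRun (([], base) :: rest) = pvRun rest := by
  rw [pvRun]; simp

theorem pvRun_cons_ne (seg : List Int) (base m : Int) (rest : List (List Int × Int))
    (hseg : ¬ seg = []) (hm : PySem.List.max? seg (fun y => y) = some m)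
    (hne : ¬ m = base + (seg.length : Int) - 1) :
    pvRun ((seg, base) :: rest) = false := by
  rw [pvRun, dif_neg hseg]
  split <;> simp_all

theorem pvRun_cons_eq (seg : List Int) (base m : Int) (p : Nat) (rest : List (List Int × Int))
    (hseg : ¬ seg = []) (hm : PySem.List.max? seg (fun y => y) = some m)
    (hne : m = base + (seg.length : Int) - 1)
    (hp : PySem.List.index? seg m = some p) :
    pvRun ((seg, base) :: rest) =
      pvRun ((seg.take p, base) :: (seg.drop (p + 1), base + (p : Int)) :: rest) := by
  have h1 : PySem.List.slice seg none (some (p : Int)) = seg.take p :=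
    PySem.List.slice_to_natCast seg p
  have h2 : PySem.List.slice seg (some ((p : Int) + 1)) none = seg.drop (p + 1) := by
    have : ((p : Int) + 1) = ((p + 1 : Nat) : Int) := by push_cast; ring
    rw [this, PySem.List.slice_from_natCast]
  conv_lhs => rw [pvRun]
  rw [dif_neg hseg]
  split <;> try simp_all
  all_goals subst hm; split <;> simp_all

theorem pvRun_eq_all (jobs : List (List Int × Int)) :
    pvRun jobs = jobs.all (fun j => pvValidB j.1 j.2) := by
  suffices H : ∀ N jobs, ((jobs.map pvJobSize).sum = N) →
      pvRun jobs = jobs.all (fun j => pvValidB j.1 j.2) from H _ jobs rfl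
  intro N
  induction N using Nat.strong_induction_on with
  | _ N ih =>
    intro jobs hN
    match jobs with
    | [] => simp [pvRun_nil]
    | (seg, base) :: rest =>
      by_cases hseg : seg = []
      · subst hseg
        rw [pvRun_cons_nil]
        rw [ih ((rest.map pvJobSize).sum) (by subst hN; simp [pvJobSize]) rest rfl]
        simp [pvValidB_nil]
      · obtain ⟨m, hm⟩ : ∃ m, PySem.List.max? seg (fun y => y) = some m := by
          cases hmx : PySem.List.max? seg (fun y => y) with
          | none => exact absurd ((PySem.List.max?_eq_none_iff seg (fun y => y)).mp hmx) hseg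
          | some m => exact ⟨m, rfl⟩
        by_cases hne : m = base + (seg.length : Int) - 1
        · have hmem : m ∈ seg := PySem.List.max?_mem hm
          obtain ⟨p, hp⟩ : ∃ p, PySem.List.index? seg m = some p := by
            cases hpx : PySem.List.index? seg m with
            | none => exact absurd ((PySem.List.index?_eq_none_iff seg m).mp hpx) (by simp [hmem])
            | some p => exact ⟨p, rfl⟩
          obtain ⟨hk, -, -⟩ := PySem.List.getElem_of_index?_eq_some hp
          rw [pvRun_cons_eq seg base m p rest hseg hm hne hp]
          rw [ih _ ?_ _ rfl]
          · rw [List.all_cons, List.all_cons, List.all_cons,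
              pvValidB_eq seg base m p hseg hm hne hp]
            simp [Bool.and_assoc]
          · subst hN
            simp [pvJobSize]
            omega
        · rw [pvRun_cons_ne seg base m rest hseg hm hne]
          rw [List.all_cons, pvValidB_ne seg base m hseg hm hne]
          simp

theorem pvEmptyFinal (seq : List Int) (t : Int)
    (h : (seq.foldl pvStepB ([], t)).1 = []) :
    seq.foldl pvStepB ([], t) = ([], t + seq.length) := by
  have hc := pvFoldl_conserve seq [] t
  have h2 : (seq.foldl pvStepB ([], t)).2 = t + seq.length := by
    rw [h] at hc; simp at hc; omega
  calc seq.foldl pvStepB ([], t) = ((seq.foldl pvStepB ([], t)).1, (seq.foldl pvStepB ([], t)).2) := rfl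
    _ = ([], t + seq.length) := by rw [h, h2]

theorem pvPerm (seq : List Int) (t : Int)
    (h : (seq.foldl pvStepB ([], t)).1 = []) :
    (seq : Multiset Int) = (pvR t (t + seq.length) : Multiset Int) := by
  have hm := pvFoldl_multiset seq [] t
  rw [pvEmptyFinal seq t h] at hm
  simpa using hm.symm

theorem pvMain (seg : List Int) (t : Int) :
    ((seg.foldl pvStepB ([], t)).1 = []) ↔ pvValidB seg t = true := by
  suffices H : ∀ N seg t, seg.length = N →
      ((((seg : List Int).foldl pvStepB ([], t)).1 = []) ↔ pvValidB seg t = true) by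
    exact H seg.length seg t rfl
  intro N
  induction N using Nat.strong_induction_on with
  | _ N ih =>
    intro seg t
    intro hN
    by_cases hseg : seg = []
    · subst hseg; simp [pvValidB_nil]
    · obtain ⟨m, hm⟩ : ∃ m, PySem.List.max? seg (fun y => y) = some m := by
        cases hmx : PySem.List.max? seg (fun y => y) with
        | none => exact absurd ((PySem.List.max?_eq_none_iff seg (fun y => y)).mp hmx) hseg
        | some m => exact ⟨m, rfl⟩
      have hLpos : 1 ≤ seg.length := by
        cases seg with | nil => exact absurd rfl hseg | cons a l => simp
      by_cases hne : m = t + (seg.length : Int) - 1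
      · -- main branch
        obtain ⟨p, hp⟩ : ∃ p, PySem.List.index? seg m = some p := by
          cases hpx : PySem.List.index? seg m with
          | none => exact absurd ((PySem.List.index?_eq_none_iff seg m).mp hpx) (by simp [PySem.List.max?_mem hm])
          | some p => exact ⟨p, rfl⟩
        obtain ⟨pre, suf, hdec, hplen, hmpre⟩ := (PySem.List.index?_eq_some_iff seg m p).mp hp
        have htake : seg.take p = pre := by rw [hdec, ← hplen]; exact List.take_left
        have hdrop : seg.drop (p + 1) = suf := by
          rw [hdec, show pre ++ m :: suf = (pre ++ [m]) ++ suf by simp]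
          have : (pre ++ [m]).length = p + 1 := by simp [hplen]
          rw [← this]; exact List.drop_left
        have hlen : seg.length = p + 1 + suf.length := by
          rw [hdec]; simp [hplen]; omega
        have hmval : m = t + (p : Int) + suf.length := by
          rw [hne, hlen]; push_cast; ring
        rw [pvValidB_eq seg t m p hseg hm hne hp, htake, hdrop]
        have ihpre := ih pre.length (by omega) pre t rfl
        have ihsuf := ih suf.length (by omega) suf (t + (p : Int)) rfl
        constructor
        · intro h
          have hperm := pvPerm seg t h
          have hub : ∀ x ∈ seg, x ≤ m := fun x hx => PySem.List.max?_isMax hm x hx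
          obtain ⟨s1, t1, hF1⟩ : ∃ s1 t1, pre.foldl pvStepB ([], t) = (s1, t1) := ⟨_, _, rfl⟩
          have hcons1 : t1 + (s1.length : Int) = t + (p : Int) := by
            have hc := pvFoldl_conserve pre [] t
            rw [hF1] at hc; simp [hplen] at hc; omega
          have hdecF : seg.foldl pvStepB ([], t) = suf.foldl pvStepB (pvDrain (m :: s1) t1) := by
            rw [hdec, List.foldl_append, hF1, List.foldl_cons]; rfl
          have hs1seg : ∀ x ∈ s1, x ≤ m := by
            intro x hx
            have hmp := pvFoldl_multiset pre [] t
            rw [hF1] at hmp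
            rw [show ((([] : List Int) : Multiset Int) + (pre : Multiset Int)) = (pre : Multiset Int) from by simp] at hmp
            have hxp : x ∈ (pre : Multiset Int) := by
              rw [← hmp]
              exact Multiset.mem_add.mpr (Or.inl (Multiset.mem_coe.mpr hx))
            exact hub x (by rw [hdec]; exact List.mem_append.mpr (Or.inl (Multiset.mem_coe.mp hxp)))
          by_cases hsuf : suf = []
          · subst hsuf
            rw [hdecF, List.foldl_nil] at h
            obtain ⟨s', t', he', hdec', hle', -⟩ := pvDrain_spec (m :: s1) t1
            rw [he'] at h
            simp only at h
            subst h
            have hlen' : ((pvR t1 t').length : Int) = 1 + s1.length := by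
              have := congrArg List.length hdec'
              simp at this; omega
            have ht1t' : t1 < t' := by
              rw [pvR, PySem.List.length_pyRange_one] at hlen'; omega
            have hmt1 : m = t1 := by
              rw [pvR, PySem.List.pyRange_one_cons ht1t'] at hdec'
              exact (List.cons_eq_cons.mp hdec').1
            have hs1nil : s1 = [] := by
              have : m = t + (p : Int) := by simpa using hmval
              have : s1.length = 0 := by omega
              exact List.eq_nil_of_length_eq_zero this
            subst hs1nil
            have hv1 := ihpre.mp (by rw [hF1])
            simp [hv1, pvValidB_nil]
          · have h1le : (1 : Int) ≤ suf.length := by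
              cases suf with | nil => exact absurd rfl hsuf | cons a l => simp
            have hmgt : t1 < m := by omega
            have hX : pvDrain (m :: s1) t1 = (m :: s1, t1) := by
              simp [pvDrain]; omega
            rw [hdecF, hX] at h
            have hsorted := pvFoldl_sorted suf (m :: s1) t1 h
            have hs1nil : s1 = [] := by
              cases s1 with
              | nil => rfl
              | cons a l =>
                have hma : m < a := (List.pairwise_cons.mp hsorted.1).1 a (by simp)
                have ham : a ≤ m := hs1seg a (by simp)
                omega
            subst hs1nil
            have ht1 : t1 = t + (p : Int) := by simpa using hcons1
            subst ht1
            have hv1 := ihpre.mp (by rw [hF1])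
            have hbot := pvBottom suf [] (t + (p : Int)) m
              (by simp; omega) (fun _ hs => absurd hs hsuf) rfl
            simp only [List.nil_append] at hbot
            rw [hbot] at h
            by_cases hsh : (suf.foldl pvStepB ([], t + (p : Int))).1 = []
            · have hv2 := ihsuf.mp hsh
              simp [hv1, hv2]
            · rw [if_neg hsh] at h
              simp at h
        · intro hv
          obtain ⟨hv1, hv2⟩ := Bool.and_eq_true_iff.mp hv
          have hpre0 : pre.foldl pvStepB ([], t) = ([], t + (p : Int)) := by
            have := pvEmptyFinal pre t (ihpre.mpr hv1)
            rwa [hplen] at this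
          rw [hdec, List.foldl_append, hpre0, List.foldl_cons]
          have hstep : pvStepB ([], t + (p : Int)) m = pvDrain [m] (t + (p : Int)) := rfl
          by_cases hsuf : suf = []
          · subst hsuf
            simp at hmval
            simp [pvStepB, pvDrain, hmval]
          · have hmgt : t + (p : Int) < m := by
              have : (1 : Int) ≤ suf.length := by
                cases suf with | nil => exact absurd rfl hsuf | cons a l => simp
              omega
            have hdm : pvDrain [m] (t + (p : Int)) = ([m], t + (p : Int)) := by
              simp [pvDrain]; omega
            rw [hstep, hdm]
            have hbot := pvBottom suf [] (t + (p : Int)) m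
              (by simp; omega) (fun _ hs => absurd hs hsuf) rfl
            simp only [List.nil_append] at hbot
            rw [hbot]
            have hsh := pvEmptyFinal suf (t + (p : Int)) (ihsuf.mpr hv2)
            rw [hsh]
            simp [pvDrain, ← hmval]
      · rw [pvValidB_ne seg t m hseg hm hne]
        simp only [Bool.false_eq_true, iff_false]
        intro h
        have hperm := pvPerm seg t h
        have hmem : m ∈ seg := PySem.List.max?_mem hm
        have hmlt : m < t + seg.length := by
          have : m ∈ (pvR t (t + seg.length) : Multiset Int) := by
            rw [← hperm]; exact Multiset.mem_coe.mpr hmem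
          have := (pvR_mem).mp (Multiset.mem_coe.mp this)
          omega
        have hmax : t + (seg.length : Int) - 1 ≤ m := by
          have hin : (t + (seg.length : Int) - 1) ∈ (seg : Multiset Int) := by
            rw [hperm]
            refine Multiset.mem_coe.mpr (pvR_mem.mpr ⟨by omega, by omega⟩)
          exact PySem.List.max?_isMax hm _ (Multiset.mem_coe.mp hin)
        omega

-- ===== VERDICT (by name: the statement is the Claim_ definition above) =====
theorem temporary_spec : Claim_equal_temporary := by
  intro num _
  unfold Spec_temporary temporary temporary_alt
  have h := pvFoldl_comm num ([], 1)
  rw [show pvDrain ([], (1:Int)).1 ([], (1:Int)).2 = ([], 1) from rfl] at h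
  have hm := pvMain num 1
  rw [h] at hm
  rw [pvRun_eq_all]
  simp only [List.all_cons, List.all_nil, Bool.and_true]
  by_cases he : (pvDrain (num.foldl pvStepA ([], 1)).1 (num.foldl pvStepA ([], 1)).2).1 = []
  · rw [if_pos he, if_pos (hm.mp he)]
  · rw [if_neg he]
    have : ¬ pvValidB num 1 = true := fun hv => he (hm.mpr hv)
    simp [this]
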